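-- pv_equiv track=rewrite | github.com/MalongSuper/Python-Programming---Algorithms | LongestIncreasingSequence.py | stalin_sort
-- ===== SOURCE A (Python) =====
-- def stalin_sort(a):
--     n = len(a)
--     if n == 1:  # If the array only has one element, return it
--         return a
--     result = [a[0]]  # Start with the first element in rhe array
--     for i in range(1, n):
--         if a[i] >= result[-1]:  # If current element is greater than
--             # or equal to the last element in result
--             result.append(a[i])  # Add it to the result
--     return result
-- ===== SOURCE B (Python) =====
-- def stalin_sort(a):
--     # Pass 1: running-maximum table; Pass 2: keep each element >= the max of the elements before it.
--     maxes = []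
--     m = None
--     for x in a:
--         if m is None or x > m:
--             m = x
--         maxes.append(m)
--     return [x for i, x in enumerate(a) if i == 0 or x >= maxes[i - 1]]
-- ===== Notes on version B (the rewrite author's own statement) =====
-- stated objective: alternative
-- what changed: B replaces A's single pass that appends to the result while comparing against its last element by two separate passes: it first builds the running-maximum table of the input and then filters with a comprehension keeping each element that is >= the prefix maximum before it.
import Mathlib
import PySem

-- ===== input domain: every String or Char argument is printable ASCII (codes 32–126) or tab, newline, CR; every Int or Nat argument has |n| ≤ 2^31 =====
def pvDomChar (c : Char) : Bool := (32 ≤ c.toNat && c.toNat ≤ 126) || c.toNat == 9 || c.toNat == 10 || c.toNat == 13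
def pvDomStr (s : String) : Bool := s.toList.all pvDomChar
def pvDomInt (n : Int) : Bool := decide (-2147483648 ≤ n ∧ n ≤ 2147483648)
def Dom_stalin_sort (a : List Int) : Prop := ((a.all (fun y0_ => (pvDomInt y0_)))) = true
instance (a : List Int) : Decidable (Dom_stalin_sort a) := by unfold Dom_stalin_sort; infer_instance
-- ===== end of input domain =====

-- B builds a running-maximum table in one pass and then filters in a second pass, instead of
-- A's single pass comparing each element against the last kept one; return values agree on
-- nonempty lists (A raises IndexError on []).

-- ===== PORT A =====
def stalin_sort (a : List Int) : List Int :=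
  let n : Int := PySem.List.len a
  if n == 1 then a
  else
    match PySem.List.pyGet? a 0 with
    | none => []   -- IndexError on the empty list; excluded by Pre_stalin_sort
    | some h =>
      (PySem.List.pyRange 1 n 1).foldl
        (fun result i =>
          let x := PySem.List.pyGetD a i 0   -- index i ∈ range(1, n) is always in range
          if PySem.List.pyGetD result (-1) 0 ≤ x then result ++ [x] else result)
        [h]

-- ===== PORT B =====
-- Source B's first loop: the running-maximum table (state: list built so far, current max as Option)
def pvMaxes (a : List Int) : List Int :=
  (a.foldl
    (fun (p : List Int × Option Int) x =>
      let m : Int := match p.2 with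
        | none => x
        | some m => if m < x then x else m
      (p.1 ++ [m], some m))
    ([], none)).1

-- Source B's comprehension: filter over enumerate(a), then take the elements
def stalin_sort_alt (a : List Int) : List Int :=
  let maxes := pvMaxes a
  ((PySem.List.enumerate a).filter
    (fun (p : Int × Int) => p.1 == 0 ||
      (match PySem.List.pyGet? maxes (p.1 - 1) with   -- index i-1 is always in range for i ≥ 1
       | some m => decide (m ≤ p.2)
       | none => false))).map Prod.snd

-- ===== PRECONDITION & SPEC =====
-- Pre_ excludes only the empty list, on which A raises IndexError (it reads a[0]).
def Pre_stalin_sort (a : List Int) : Prop := a ≠ []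
instance (a : List Int) : Decidable (Pre_stalin_sort a) := by unfold Pre_stalin_sort; infer_instance
def pvWitness_stalin_sort : List Int := [3, 1, 4, 4, 2, 5]

def Spec_stalin_sort (a : List Int) (out : List Int) : Prop := out = stalin_sort_alt a
instance (a : List Int) (out : List Int) : Decidable (Spec_stalin_sort a out) := by unfold Spec_stalin_sort; infer_instance

-- ===== CLAIM (what is proved, stated in full; the proofs are below) =====
def Claim_equal_stalin_sort : Prop := ∀ (a : List Int), Dom_stalin_sort a → Pre_stalin_sort a → Spec_stalin_sort a (stalin_sort a)

-- ===== LEMMAS AND PROOFS =====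

-- the common characterisation: keep x iff it is ≥ the running max m (which then becomes x)
def pvKeep (m : Int) : List Int → List Int
  | [] => []
  | x :: xs => if m ≤ x then x :: pvKeep x xs else pvKeep m xs

-- the tail of the running-max table, as a structural recursion
def pvPmax (m : Int) : List Int → List Int
  | [] => []
  | x :: xs => (if m < x then x else m) :: pvPmax (if m < x then x else m) xs

lemma pvMaxes_fold (t : List Int) : ∀ (acc : List Int) (m : Int),
    (t.foldl
      (fun (p : List Int × Option Int) x =>
        let m : Int := match p.2 with
          | none => x
          | some m => if m < x then x else m
        (p.1 ++ [m], some m))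
      (acc, some m)).1 = acc ++ pvPmax m t := by
  induction t with
  | nil => intro acc m; simp [pvPmax]
  | cons x xs ih =>
    intro acc m
    simp only [List.foldl_cons, pvPmax]
    rw [ih (acc ++ [if m < x then x else m]) (if m < x then x else m)]
    simp

lemma pvMaxes_cons (h : Int) (t : List Int) : pvMaxes (h :: t) = h :: pvPmax h t := by
  unfold pvMaxes
  simp only [List.foldl_cons]
  exact pvMaxes_fold t [h] h

-- B's filtered comprehension over the tail consumes one table entry per element
def pvZipKeep : List Int → List Int → List Int
  | _, [] => []
  | ms, x :: xs =>
    match ms with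
    | [] => pvZipKeep [] xs
    | m :: ms' => if m ≤ x then x :: pvZipKeep ms' xs else pvZipKeep ms' xs

lemma enumerate_filter_keep (t : List Int) : ∀ (M : List Int) (s : Nat),
    ((PySem.List.enumerate t ((s : Int) + 1)).filter
      (fun (p : Int × Int) => p.1 == 0 ||
        (match PySem.List.pyGet? M (p.1 - 1) with
         | some m => decide (m ≤ p.2)
         | none => false))).map Prod.snd = pvZipKeep (M.drop s) t := by
  induction t with
  | nil => intro M s; simp [PySem.List.enumerate_nil, pvZipKeep]
  | cons x xs ih =>
    intro M s
    rw [PySem.List.enumerate_cons]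
    have hidx : PySem.List.pyGet? M ((s : Int) + 1 - 1) = M[s]? := by
      have h1 : (s : Int) + 1 - 1 = (s : Int) := by ring
      rw [h1]
      simp only [PySem.List.pyGet?, PySem.List.pyIdx?]
      by_cases hlen : s < M.length
      · simp [hlen]
      · simp [hlen]
    have hs0 : (((s : Int) + 1) == 0) = false := by
      simp; omega
    have hstep : (s : Int) + 1 + 1 = ((s + 1 : Nat) : Int) + 1 := by push_cast; ring
    rw [List.filter_cons]
    simp only [hidx, hs0, Bool.false_or]
    cases hM : M[s]? with
    | none =>
      have hlen : M.length ≤ s := by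
        simpa [List.getElem?_eq_none_iff] using hM
      have hdrop : M.drop s = [] := List.drop_eq_nil_iff.mpr hlen
      have hdrop' : M.drop (s+1) = [] := List.drop_eq_nil_iff.mpr (by omega)
      rw [if_neg (by simp)]
      rw [hstep, ih M (s+1), hdrop, hdrop', pvZipKeep]
    | some m =>
      have hlt : s < M.length := by
        by_contra hc
        rw [List.getElem?_eq_none_iff.mpr (by omega)] at hM
        simp at hM
      have hdrop : M.drop s = m :: M.drop (s+1) := by
        rw [List.drop_eq_getElem_cons hlt]
        have : M[s] = m := by
          have := List.getElem?_eq_getElem hlt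
          rw [hM] at this; exact (Option.some.inj this).symm
        simp [this]
      rw [hdrop, pvZipKeep]
      by_cases hc : m ≤ x
      · rw [if_pos (by simp [hc]), if_pos (by exact hc), List.map_cons, hstep, ih M (s+1)]
      · rw [if_neg (by simp [hc]), if_neg hc, hstep, ih M (s+1)]

lemma zipKeep_pmax (t : List Int) : ∀ m : Int, pvZipKeep (m :: pvPmax m t) t = pvKeep m t := by
  induction t with
  | nil => intro m; simp [pvZipKeep, pvKeep]
  | cons x xs ih =>
    intro m
    simp only [pvPmax, pvZipKeep, pvKeep]
    by_cases h : m ≤ x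
    · have hmx : (if m < x then x else m) = x := by
        by_cases h' : m < x
        · simp [h']
        · simp [h']; omega
      simp only [if_pos h, hmx, ih x]
    · have hmx : (if m < x then x else m) = m := by
        have : ¬ m < x := by omega
        simp [this]
      simp only [if_neg h, hmx, ih m]

-- B on a nonempty list is h :: pvKeep h t
lemma alt_cons (h : Int) (t : List Int) : stalin_sort_alt (h :: t) = h :: pvKeep h t := by
  have key := enumerate_filter_keep t (h :: pvPmax h t) 0
  simp only [Nat.cast_zero, List.drop_zero] at key
  simp only [stalin_sort_alt, pvMaxes_cons, PySem.List.enumerate_cons, List.filter_cons]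
  norm_num at key ⊢
  rw [key, zipKeep_pmax]

lemma pyGetD_neg_one_append (l : List Int) (x : Int) :
    PySem.List.pyGetD (l ++ [x]) (-1) 0 = x := by
  simp [PySem.List.pyGetD, PySem.List.pyGet?, PySem.List.pyIdx?]

-- A's loop body, once foldl_pyRange_pyGetD has removed the indexing
lemma stalin_fold (t : List Int) : ∀ (res : List Int) (m : Int),
    PySem.List.pyGetD res (-1) 0 = m →
    t.foldl (fun result x =>
        if PySem.List.pyGetD result (-1) 0 ≤ x then result ++ [x] else result) res
      = res ++ pvKeep m t := by
  induction t with
  | nil => intro res m _; simp [pvKeep]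
  | cons x xs ih =>
    intro res m hm
    simp only [List.foldl_cons, pvKeep, hm]
    by_cases h : m ≤ x
    · simp only [if_pos h]
      rw [ih (res ++ [x]) x (pyGetD_neg_one_append res x)]
      simp
    · simp only [if_neg h]
      exact ih res m hm

-- A on a nonempty list is h :: pvKeep h t
lemma a_cons (h : Int) (t : List Int) : stalin_sort (h :: t) = h :: pvKeep h t := by
  have hlen : PySem.List.len (h :: t) = (t.length : Int) + 1 := by
    simp [PySem.List.len_eq]
  by_cases h1 : ((PySem.List.len (h :: t)) == 1) = true
  · have ht : t = [] := by
      rw [hlen] at h1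
      simp only [beq_iff_eq] at h1
      have : t.length = 0 := by omega
      exact List.length_eq_zero_iff.mp this
    subst ht
    simp [stalin_sort, pvKeep, PySem.List.len_eq]
  · have hget : PySem.List.pyGet? (h :: t) 0 = some h := by
      simp [PySem.List.pyGet?, PySem.List.pyIdx?]
    have hfold := PySem.List.foldl_pyRange_pyGetD (h :: t) 0
      (fun result x =>
        if PySem.List.pyGetD result (-1) 0 ≤ x then result ++ [x] else result)
      [h] (a := 1) (by omega)
    simp only [stalin_sort, h1, hget]
    rw [hfold]
    have hdrop : (h :: t).drop (1 : Int).toNat = t := by simp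
    rw [hdrop, stalin_fold t [h] h (by simp [PySem.List.pyGetD, PySem.List.pyGet?, PySem.List.pyIdx?])]
    simp

-- ===== VERDICT (by name: the statement is the Claim_ definition above) =====
theorem stalin_sort_spec : Claim_equal_stalin_sort := by
  intro a _ hpre
  unfold Spec_stalin_sort
  cases a with
  | nil => exact absurd rfl hpre
  | cons h t => rw [a_cons, alt_cons]
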